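-- pv_equiv track=rewrite | github.com/AvidDollars/advent-of-code-2022-python | day_5-supply_stacks/current_day_helpers.py | parse_floor
-- ===== SOURCE A (Python) =====
-- def parse_floor(floor):
--     parsed = []
--     floor_iter = iter(floor)
--
--     while True:
--         try:
--             for item in range(4):
--                 next(floor_iter)
--
--                 if item := next(floor_iter):
--                     parsed.append(item)
--                 else:
--                     parsed.append(" ")
--
--                 next(floor_iter), next(floor_iter)
--         except StopIteration:
--             return parsed
-- ===== SOURCE B (Python) =====
-- def parse_floor(floor):
--     return [floor[i] for i in range(1, len(floor), 4)]
-- ===== Notes on version B (the rewrite author's own statement) =====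
-- stated objective: simpler
-- what changed: Replaces A's manual iterator with try/except StopIteration and a dead falsy-element branch by a single comprehension over range(1, len(floor), 4) picking every 4th character starting at index 1.
import Mathlib
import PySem

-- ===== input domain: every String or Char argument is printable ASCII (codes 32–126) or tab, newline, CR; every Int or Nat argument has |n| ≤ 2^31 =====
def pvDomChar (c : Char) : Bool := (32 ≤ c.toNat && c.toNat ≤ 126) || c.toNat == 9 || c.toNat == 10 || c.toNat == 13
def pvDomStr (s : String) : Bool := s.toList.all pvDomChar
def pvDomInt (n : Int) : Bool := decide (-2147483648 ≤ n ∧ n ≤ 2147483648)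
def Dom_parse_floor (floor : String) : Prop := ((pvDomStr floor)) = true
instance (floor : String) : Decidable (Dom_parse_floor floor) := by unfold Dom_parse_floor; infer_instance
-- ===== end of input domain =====

-- B replaces A's iterator/try-except group-of-4 stepping by a comprehension over range(1, len(floor), 4); same O(n) cost, simpler.

-- ===== PORT A =====
-- A pulls characters from an iterator: each inner step consumes one char, takes the next
-- one as `item` and appends it (or " " if falsy — for a string, `item` is a 1-char string,
-- but the branch is transliterated as written), then consumes two more; a StopIteration
-- anywhere returns the accumulator.  Modelled on the char list:
def parseFloorLoop : List Char → List String → List String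
  | _c0 :: c1 :: rest2, acc =>
      let acc' := acc ++ [if String.ofList [c1] ≠ "" then String.ofList [c1] else " "]
      match rest2 with
      | _ :: _ :: rest => parseFloorLoop rest acc'   -- the two trailing next() succeed, loop on
      | _ => acc'                                    -- StopIteration on a trailing next()
  | _, acc => acc                                    -- StopIteration before `item` was read

def parse_floor (floor : String) : List String :=
  parseFloorLoop floor.toList []

-- ===== PORT B =====
-- [floor[i] for i in range(1, len(floor), 4)]  (each floor[i] is a 1-char string, always in range)
def parse_floor_alt (floor : String) : List String :=
  (PySem.List.pyRange 1 (PySem.Str.len floor) 4).map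
    (fun i => String.ofList [PySem.List.pyGetD floor.toList i ' '])

-- ===== PRECONDITION & SPEC =====
def Spec_parse_floor (floor : String) (out : List String) : Prop := out = parse_floor_alt floor
instance (floor : String) (out : List String) : Decidable (Spec_parse_floor floor out) := by unfold Spec_parse_floor; infer_instance

-- ===== CLAIM (what is proved, stated in full; the proofs are below) =====
def Claim_equal_parse_floor : Prop := ∀ (floor : String), Dom_parse_floor floor → Spec_parse_floor floor (parse_floor floor)

-- ===== LEMMAS AND PROOFS =====

-- the common characterisation: the 2nd character of each successive group of 4
def chunks : List Char → List String
  | _ :: c1 :: _ :: _ :: rest => String.ofList [c1] :: chunks rest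
  | _ :: c1 :: _ => [String.ofList [c1]]
  | _ => []

theorem parseFloorLoop_eq_chunks (l : List Char) (acc : List String) :
    parseFloorLoop l acc = acc ++ chunks l := by
  induction l using chunks.induct generalizing acc with
  | case1 c0 c1 c2 c3 rest ih =>
      simp [parseFloorLoop, chunks, ih]
  | case2 c0 c1 tail h =>
      rcases tail with _ | ⟨a, _ | ⟨b, t⟩⟩
      · simp [parseFloorLoop, chunks]
      · simp [parseFloorLoop, chunks]
      · exact ((h a b t) rfl).elim
  | case3 t h1 h2 =>
      rcases t with _ | ⟨c0, _ | ⟨c1, t⟩⟩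
      · simp [parseFloorLoop, chunks]
      · simp [parseFloorLoop, chunks]
      · exact ((h2 c0 c1 t) rfl).elim

-- how many indices range(1, n, 4) yields (the count inside PySem.List.pyRange_of_pos)
def cnt (n : Nat) : Nat := if (1:Int) < (n:Int) then (((n:Int) - 1 + 4 - 1) / 4).toNat else 0

theorem cnt_add_four (n : Nat) : cnt (n + 4) = cnt n + 1 := by
  unfold cnt
  have h1 : ((n:Int) + 4 - 1 + 4 - 1) / 4 = ((n:Int) - 1 + 4 - 1) / 4 + 1 := by
    rw [show ((n:Int) + 4 - 1 + 4 - 1) = ((n:Int) - 1 + 4 - 1) + 1 * 4 by ring,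
      Int.add_mul_ediv_right _ _ (by norm_num)]
  push_cast
  rw [if_pos (by omega), h1]
  split_ifs with h
  · omega
  · have hn : n = 0 ∨ n = 1 := by omega
    rcases hn with h|h <;> subst h <;> decide

theorem pyGetD_one_cons (a b : Char) (l : List Char) :
    PySem.List.pyGetD (a :: b :: l) (1 : Int) ' ' = b := by
  rw [show (1:Int) = ((1:Nat):Int) from rfl, PySem.List.pyGetD_natCast]; rfl

theorem alt_eq_chunks (l : List Char) :
    (PySem.List.pyRange 1 (l.length : Int) 4).map
      (fun i => String.ofList [PySem.List.pyGetD l i ' ']) = chunks l := by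
  rw [PySem.List.pyRange_of_pos 1 (l.length : Int) (by norm_num), List.map_map]
  show List.map _ (List.range (cnt l.length)) = _
  induction l using chunks.induct with
  | case1 c0 c1 c2 c3 rest ih =>
      rw [show (c0 :: c1 :: c2 :: c3 :: rest).length = rest.length + 4 by simp,
        cnt_add_four, List.range_succ_eq_map, List.map_cons, List.map_map]
      unfold chunks
      refine congrArg₂ _ ?_ ?_
      · simp [Function.comp, pyGetD_one_cons]
      · rw [← ih]
        apply List.map_congr_left
        intro k _
        have h5 : (1 : Int) + 4 * ((k.succ : Nat) : Int) = (((4 * k + 5 : Nat)) : Int) := by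
          push_cast; ring
        have h2 : (1 : Int) + 4 * ((k : Nat) : Int) = (((4 * k + 1 : Nat)) : Int) := by
          push_cast; ring
        simp only [Function.comp, h5, h2, PySem.List.pyGetD_natCast]
        rw [show (4 * k + 5) = (4 * k + 1) + 1 + 1 + 1 + 1 by ring]
        simp [List.getElem?_cons_succ]
  | case2 c0 c1 tail h =>
      rcases tail with _ | ⟨a, _ | ⟨b, t⟩⟩
      · rw [show ([c0, c1]).length = 2 from rfl, show cnt 2 = 1 from rfl, List.range_succ]
        simp [chunks, Function.comp, pyGetD_one_cons]
      · rw [show ([c0, c1, a]).length = 3 from rfl, show cnt 3 = 1 from rfl, List.range_succ]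
        simp [chunks, Function.comp, pyGetD_one_cons]
      · exact ((h a b t) rfl).elim
  | case3 t h1 h2 =>
      rcases t with _ | ⟨c0, _ | ⟨c1, t⟩⟩
      · simp [chunks, cnt]
      · simp [chunks, cnt]
      · exact ((h2 c0 c1 t) rfl).elim

-- ===== VERDICT (by name: the statement is the Claim_ definition above) =====
theorem parse_floor_spec : Claim_equal_parse_floor := by
  intro floor _
  show parse_floor floor = parse_floor_alt floor
  unfold parse_floor parse_floor_alt
  rw [parseFloorLoop_eq_chunks, List.nil_append]
  rw [show PySem.Str.len floor = (floor.toList.length : Int) from rfl]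
  exact (alt_eq_chunks floor.toList).symm
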